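-- pv_equiv track=rewrite | github.com/jahirulislammolla/CodeFights | Fights/replaceFirstDigitRegExp.py | replaceFirstDigitRegExp
-- ===== SOURCE A (Python) =====
-- def replaceFirstDigitRegExp(input):
--     s=""
--     k=0
--     for i in input:
--         if i in "0123456789" and k==0:
--             s+="#"
--             k=1
--         else:
--             s+=i
--     return s
-- ===== SOURCE B (Python) =====
-- def replaceFirstDigitRegExp(input):
--     i = next((j for j, c in enumerate(input) if c in "0123456789"), None)
--     if i is None:
--         return input
--     return input[:i] + "#" + input[i + 1:]
-- ===== Notes on version B (the rewrite author's own statement) =====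
-- stated objective: simpler
-- what changed: Replaces the stateful accumulating pass (flag k plus character-by-character string growth) with locate-then-slice: find the index of the first ASCII digit and splice the replacement hash character in by slicing, returning the input unchanged when no digit exists.
import Mathlib
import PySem

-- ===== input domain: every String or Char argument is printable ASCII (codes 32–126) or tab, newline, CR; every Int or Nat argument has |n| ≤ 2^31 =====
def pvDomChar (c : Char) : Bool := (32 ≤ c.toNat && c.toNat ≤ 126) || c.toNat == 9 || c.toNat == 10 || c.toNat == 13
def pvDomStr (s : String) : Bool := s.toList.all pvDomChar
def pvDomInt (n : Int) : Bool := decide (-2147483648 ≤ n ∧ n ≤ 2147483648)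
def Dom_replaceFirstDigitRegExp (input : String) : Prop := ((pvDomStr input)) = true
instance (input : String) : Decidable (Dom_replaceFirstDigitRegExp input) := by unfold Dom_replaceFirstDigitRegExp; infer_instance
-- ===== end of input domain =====

-- B replaces A's stateful accumulating pass (flag k) with locate-then-slice; objective: simpler.

-- ===== PORT A =====
-- literal port of A: fold over the characters with state (s, k)
def replaceFirstDigitRegExp (input : String) : String :=
  String.ofList
    (input.toList.foldl
      (fun (st : List Char × Int) i =>
        if i ∈ "0123456789".toList ∧ st.2 = 0 then (st.1 ++ ['#'], 1) else (st.1 ++ [i], st.2))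
      ([], 0)).1

-- ===== PORT B =====
-- port of Source B: find the first digit's index, then splice by slicing
def replaceFirstDigitRegExp_alt (input : String) : String :=
  match input.toList.findIdx? (fun c => decide (c ∈ "0123456789".toList)) with
  | none => input
  | some i => String.ofList (input.toList.take i ++ ['#'] ++ input.toList.drop (i + 1))

-- ===== PRECONDITION & SPEC =====
def Spec_replaceFirstDigitRegExp (input : String) (out : String) : Prop := out = replaceFirstDigitRegExp_alt input
instance (input : String) (out : String) : Decidable (Spec_replaceFirstDigitRegExp input out) := by unfold Spec_replaceFirstDigitRegExp; infer_instance

-- ===== CLAIM (what is proved, stated in full; the proofs are below) =====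
def Claim_equal_replaceFirstDigitRegExp : Prop := ∀ (input : String), Dom_replaceFirstDigitRegExp input → Spec_replaceFirstDigitRegExp input (replaceFirstDigitRegExp input)

-- ===== LEMMAS AND PROOFS =====

-- A's fold once the flag is set: it just appends the rest
theorem pvFoldDone (l acc : List Char) :
    l.foldl
      (fun (st : List Char × Int) i =>
        if i ∈ "0123456789".toList ∧ st.2 = 0 then (st.1 ++ ['#'], 1) else (st.1 ++ [i], st.2))
      (acc, 1) = (acc ++ l, 1) := by
  induction l generalizing acc with
  | nil => simp
  | cons c cs ih =>
    rw [List.foldl_cons, if_neg (by simp), ih]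
    simp

-- A's fold with the flag clear, characterised by findIdx?
theorem pvFoldMain (l acc : List Char) :
    (l.foldl
      (fun (st : List Char × Int) i =>
        if i ∈ "0123456789".toList ∧ st.2 = 0 then (st.1 ++ ['#'], 1) else (st.1 ++ [i], st.2))
      (acc, 0)).1 =
    acc ++ (match l.findIdx? (fun c => decide (c ∈ "0123456789".toList)) with
      | none => l
      | some i => l.take i ++ ['#'] ++ l.drop (i + 1)) := by
  induction l generalizing acc with
  | nil => simp
  | cons c cs ih =>
    rw [List.foldl_cons, List.findIdx?_cons]
    by_cases hc : c ∈ "0123456789".toList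
    · rw [if_pos ⟨hc, rfl⟩, pvFoldDone,
        if_pos (show decide (c ∈ "0123456789".toList) = true from decide_eq_true hc)]
      simp
    · rw [if_neg (fun h => hc h.1), ih,
        if_neg (by simpa using hc)]
      cases h : cs.findIdx? (fun c => decide (c ∈ "0123456789".toList)) with
      | none => simp
      | some i => simp [List.take_succ_cons, List.drop_succ_cons]

-- ===== VERDICT (by name: the statement is the Claim_ definition above) =====
theorem replaceFirstDigitRegExp_spec : Claim_equal_replaceFirstDigitRegExp := by
  intro input _
  unfold Spec_replaceFirstDigitRegExp replaceFirstDigitRegExp replaceFirstDigitRegExp_alt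
  rw [pvFoldMain]
  cases h : input.toList.findIdx? (fun c => decide (c ∈ "0123456789".toList)) with
  | none => simp [h, String.ofList_toList]
  | some i => simp [h]
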